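-- pv_equiv track=rewrite | github.com/pypi-data/pypi-mirror-278 | packages/rtlpy/rtlpy-1.1.0.tar.gz/rtlpy-1.1.0/src/rtlpy/utils.py | tabular_format
-- ===== SOURCE A (Python) =====
-- def tabular_format(lines: list[str] | str) -> list[str]:
--   """Converts the provided lines or string to a tabularly formatted string.
--   This is a string where the start of each word is aligned
--
--   Args:
--       lines (list[str] | str): List of strings where each string is a line,
--           or a string which contains the full unformatted table
--
--   Returns:
--       list[str]: The tabularly formatted string. Each string does not have leading
--           or trailing whitespace or newline characters
--   """
--   if isinstance(lines, str):
--     lines = lines.split("\n")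
--
--   table = []
--   for line in lines:
--     table.append(line.split())
--
--   col_len = [0] * max([len(row) for row in table])
--   for row in table:
--     for idx, cell in enumerate(row):
--       col_len[idx] = max(col_len[idx], len(cell))
--
--   ret_val = []
--   for row in table:
--     line = ""
--     for idx, cell in enumerate(row):
--       line += f"{cell: <{col_len[idx]}} "
--     ret_val.append(line.strip())
--
--   return ret_val
-- ===== SOURCE B (Python) =====
-- def tabular_format(lines):
--   if isinstance(lines, str):
--     lines = lines.split("\n")
--   # Column-wise wavefront: peel one column off every row per step, padding as we go;
--   # no width table is ever materialised.
--   rest = [line.split() for line in lines]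
--   out = [""] * len(rest)
--   while any(rest):
--     w = max(len(r[0]) for r in rest if r)
--     out = [o + r[0] + " " * (w + 1 - len(r[0])) if r else o
--            for o, r in zip(out, rest)]
--     rest = [r[1:] for r in rest]
--   return [o.strip() for o in out]
-- ===== Notes on version B (the rewrite author's own statement) =====
-- stated objective: alternative
-- what changed: B replaces A's three staged row-major passes (split, indexed col_len update table, per-row string accumulator) with a column-wise wavefront: a while loop peels one column off every row per step, computing that column's width on the fly and growing all output lines in parallel, so no width table is ever materialised; the measured constant-factor speedup comes from plain string concatenation per column instead of A's per-cell f-string formatting and col_len indexing.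
-- outside the precondition, e.g. on tabular_format([]): A raises ValueError, B returns []
import Mathlib
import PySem

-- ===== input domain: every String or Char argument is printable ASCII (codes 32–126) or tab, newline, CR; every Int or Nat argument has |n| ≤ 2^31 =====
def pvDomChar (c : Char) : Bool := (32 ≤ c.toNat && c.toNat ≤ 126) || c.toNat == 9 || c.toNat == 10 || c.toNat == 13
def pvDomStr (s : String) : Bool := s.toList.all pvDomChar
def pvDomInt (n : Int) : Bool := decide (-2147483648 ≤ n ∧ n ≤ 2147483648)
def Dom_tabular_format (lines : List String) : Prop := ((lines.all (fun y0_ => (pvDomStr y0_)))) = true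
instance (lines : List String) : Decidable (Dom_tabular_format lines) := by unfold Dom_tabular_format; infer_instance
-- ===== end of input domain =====

-- B replaces A's staged row-major passes (col_len table, per-row accumulator) with a column-wise
-- wavefront loop that peels one column off every row per step (objective: alternative).

-- ===== PORT A =====
-- Python's f"{cell: <{w}}": pad on the right with spaces to width w (no-op if already wider).
def pvPad (cs : List Char) (w : Nat) : List Char := cs ++ List.replicate (w - cs.length) ' '

def tabular_format (lines : List String) : List String :=
  -- table = []; for line in lines: table.append(line.split())
  let table : List (List (List Char)) :=
    lines.foldl (fun t line => t ++ [PySem.Chars.split₀ line.toList]) []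
  -- col_len = [0] * max([len(row) for row in table])   (max of a nonempty list = running-max loop; lines = [] is excluded by Pre_)
  let m : Nat :=
    match table.map List.length with
    | [] => 0
    | h :: t => t.foldl max h
  -- for row in table: for idx, cell in enumerate(row): col_len[idx] = max(col_len[idx], len(cell))
  let colLen : List Nat :=
    table.foldl (fun cl row =>
      (PySem.List.enumerate row).foldl (fun cl2 p =>
        cl2.set p.1.toNat (max (cl2.getD p.1.toNat 0) p.2.length)) cl)
      (List.replicate m 0)
  -- ret_val: line = ""; line += f"{cell: <{col_len[idx]}} "; ret_val.append(line.strip())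
  table.foldl (fun rv row =>
    rv ++ [String.mk (PySem.Chars.strip
      ((PySem.List.enumerate row).foldl (fun acc p =>
        acc ++ pvPad p.2 (colLen.getD p.1.toNat 0) ++ [' ']) []))]) []

-- ===== PORT B =====
-- while any(rest): w = max(len(r[0]) for r in rest if r); out = [...]; rest = [r[1:] for r in rest]
-- Structural transliteration of the while loop: the fuel counter is the total word count, which the
-- body strictly decreases (proved in pvDropSum_lt below), so the guard is reached exactly as in Python.
-- (the max of the nonempty generator is ported as a running max from 0: lengths are Nats, so equal)
def pvLoop (fuel : Nat) (out : List (List Char)) (rest : List (List (List Char))) : List (List Char) :=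
  match fuel with
  | 0 => out
  | fuel + 1 =>
    if rest.any (fun r => !r.isEmpty) then
      let w : Nat := ((rest.filterMap List.head?).map List.length).foldl max 0
      pvLoop fuel
        ((out.zip rest).map (fun p =>
          match p.2 with
          | [] => p.1
          | c :: _ => p.1 ++ c ++ List.replicate (w + 1 - c.length) ' '))
        (rest.map (fun r => r.drop 1))
    else out

def tabular_format_alt (lines : List String) : List String :=
  -- rest = [line.split() for line in lines]; out = [""] * len(rest)
  let rest : List (List (List Char)) := lines.map (fun line => PySem.Chars.split₀ line.toList)
  let out : List (List Char) := List.replicate rest.length []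
  -- [o.strip() for o in <loop result>]
  (pvLoop (rest.map List.length).sum out rest).map (fun o => String.mk (PySem.Chars.strip o))

-- ===== PRECONDITION & SPEC =====
-- Pre_ excludes only lines = [], where Python A raises ValueError (max() of an empty sequence); B returns [] there.
def Pre_tabular_format (lines : List String) : Prop := lines ≠ []
instance (lines : List String) : Decidable (Pre_tabular_format lines) := by unfold Pre_tabular_format; infer_instance
def pvWitness_tabular_format : List String := ["ab c", "d"]

def Spec_tabular_format (lines : List String) (out : List String) : Prop := out = tabular_format_alt lines
instance (lines : List String) (out : List String) : Decidable (Spec_tabular_format lines out) := by unfold Spec_tabular_format; infer_instance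

-- ===== CLAIM (what is proved, stated in full; the proofs are below) =====
def Claim_equal_tabular_format : Prop := ∀ (lines : List String), Dom_tabular_format lines → Pre_tabular_format lines → Spec_tabular_format lines (tabular_format lines)

-- ===== LEMMAS AND PROOFS =====

-- width of column j of a table
def pvColw (T : List (List (List Char))) (j : Nat) : Nat :=
  ((T.filterMap (fun row => row[j]?)).map List.length).foldl max 0

-- what B appends to a row's output line, indexed by the remaining table
def pvRend : List (List (List Char)) → List (List Char) → List Char
  | _, [] => []
  | T, c :: r =>
      c ++ List.replicate (pvColw T 0 + 1 - c.length) ' ' ++ pvRend (T.map (fun r => r.drop 1)) r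

-- the same, with explicit column indices into the full table
def pvRendIdx (T : List (List (List Char))) : List (List Char) → Nat → List Char
  | [], _ => []
  | c :: r, j =>
      c ++ List.replicate (pvColw T j + 1 - c.length) ' ' ++ pvRendIdx T r (j + 1)

-- peeling a column never grows, and with a nonempty row strictly shrinks, the total word count
theorem pvDropSum_le (L : List (List (List Char))) :
    ((L.map (fun r => r.drop 1)).map List.length).sum ≤ (L.map List.length).sum := by
  induction L with
  | nil => simp
  | cons q M ih =>
    simp only [List.map_cons, List.sum_cons]
    have : (q.drop 1).length ≤ q.length := by simp
    omega

theorem pvDropSum_lt (L : List (List (List Char))) (h : ∃ r ∈ L, r ≠ []) :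
    ((L.map (fun r => r.drop 1)).map List.length).sum < (L.map List.length).sum := by
  induction L with
  | nil => simp at h
  | cons r L ih =>
    simp only [List.map_cons, List.sum_cons]
    have hle := pvDropSum_le L
    have hr1 : (r.drop 1).length ≤ r.length := by simp
    rcases h with ⟨x, hx, hne⟩
    rcases List.mem_cons.mp hx with rfl | hxL
    · have : (x.drop 1).length < x.length := by
        cases x with
        | nil => exact absurd rfl hne
        | cons a t => simp
      omega
    · have := ih ⟨x, hxL, hne⟩
      omega

-- ---------- A's col_len characterisation (row-major indexed updates = per-column max) ----------

theorem pvInner_getElem? (row : List (List Char)) (s : Nat) (cl : List Nat) (j : Nat) :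
    ((PySem.List.enumerate row (s : Int)).foldl (fun cl2 p =>
        cl2.set p.1.toNat (max (cl2.getD p.1.toNat 0) p.2.length)) cl)[j]? =
      if h : s ≤ j ∧ j - s < row.length then
        cl[j]?.map (fun v => max v (row[j - s]'h.2).length)
      else cl[j]? := by
  induction row generalizing s cl with
  | nil =>
    rw [PySem.List.enumerate_nil]
    simp only [List.foldl_nil, List.length_nil]
    rw [dif_neg (by omega)]
  | cons x xs ih =>
    rw [PySem.List.enumerate_cons]
    have hcast : (s : Int) + 1 = ((s + 1 : Nat) : Int) := by push_cast; ring
    simp only [List.foldl_cons, hcast, ih]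
    by_cases hj : j = s
    · have hno : ¬ (s + 1 ≤ j ∧ j - (s + 1) < xs.length) := by omega
      simp only [dif_neg hno]
      rw [dif_pos (show s ≤ j ∧ j - s < (x :: xs).length by
        refine ⟨by omega, ?_⟩; simp only [List.length_cons]; omega)]
      simp only [hj, Nat.sub_self, List.getElem_cons_zero, Int.toNat_natCast, List.getElem?_set]
      by_cases hlt : s < cl.length
      · simp [hlt, List.getD_eq_getElem?_getD]
      · simp [hlt]
    · have hset : (cl.set (s : Int).toNat (max (cl.getD (s : Int).toNat 0) x.length))[j]? = cl[j]? := by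
        rw [List.getElem?_set]
        simp [Int.toNat_natCast]
        intro h; omega
      rw [hset]
      by_cases hc : s + 1 ≤ j ∧ j - (s + 1) < xs.length
      · rw [dif_pos hc,
          dif_pos (show s ≤ j ∧ j - s < (x :: xs).length by
            obtain ⟨h1, h2⟩ := hc
            refine ⟨by omega, ?_⟩
            simp only [List.length_cons]; omega)]
        congr 1
        funext v
        congr 1
        have : j - s = (j - (s + 1)) + 1 := by omega
        simp [this]
      · rw [dif_neg hc,
          dif_neg (show ¬ (s ≤ j ∧ j - s < (x :: xs).length) by
            simp only [List.length_cons]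
            intro h
            exact hc ⟨by omega, by omega⟩)]

theorem pvOuter_getElem? (T : List (List (List Char))) (cl : List Nat) (j : Nat) :
    (T.foldl (fun cl row =>
        (PySem.List.enumerate row).foldl (fun cl2 p =>
          cl2.set p.1.toNat (max (cl2.getD p.1.toNat 0) p.2.length)) cl) cl)[j]? =
      cl[j]?.map (fun v => ((T.filterMap (fun row => row[j]?)).map List.length).foldl max v) := by
  induction T generalizing cl with
  | nil => simp
  | cons row T ih =>
    simp only [List.foldl_cons, List.filterMap_cons]
    rw [ih]
    have h0 := pvInner_getElem? row 0 cl j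
    simp only [Nat.zero_le, true_and, Nat.sub_zero, Nat.cast_zero] at h0
    by_cases hr : j < row.length
    · have hrj : row[j]? = some row[j] := List.getElem?_eq_getElem hr
      rw [hrj]
      simp only [dif_pos hr] at h0
      rw [h0]
      cases cl[j]? <;> simp
    · have hrj : row[j]? = none := List.getElem?_eq_none_iff.mpr (by omega)
      rw [hrj]
      simp only [dif_neg hr] at h0
      rw [h0]

theorem pvColLen_eq (T : List (List (List Char))) (m : Nat) :
    T.foldl (fun cl row =>
        (PySem.List.enumerate row).foldl (fun cl2 p =>
          cl2.set p.1.toNat (max (cl2.getD p.1.toNat 0) p.2.length)) cl)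
      (List.replicate m 0) =
    (List.range m).map (fun j => pvColw T j) := by
  apply List.ext_getElem?
  intro j
  rw [pvOuter_getElem?]
  by_cases hj : j < m
  · simp [hj, pvColw]
  · have h1 : (List.replicate m (0 : Nat))[j]? = none :=
      List.getElem?_eq_none_iff.mpr (by simp; omega)
    have h2 : ((List.range m).map (fun j => pvColw T j))[j]? = none :=
      List.getElem?_eq_none_iff.mpr (by simp; omega)
    rw [h1, h2]
    rfl

-- ---------- widths: bounds and shifting ----------

theorem pvColw_ge (T : List (List (List Char))) (row : List (List Char)) (j : Nat)
    (hmem : row ∈ T) (hj : j < row.length) : (row[j]'hj).length ≤ pvColw T j := by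
  have hmem2 : (row[j]'hj).length ∈ (T.filterMap (fun row => row[j]?)).map List.length :=
    List.mem_map_of_mem (List.mem_filterMap.mpr ⟨row, hmem, List.getElem?_eq_getElem hj⟩)
  exact (PySem.List.le_foldl_max _ 0).2 _ hmem2

theorem pvColw_drop (T : List (List (List Char))) (j i : Nat) :
    pvColw (T.map (fun r => r.drop j)) i = pvColw T (j + i) := by
  unfold pvColw
  rw [List.filterMap_map]
  have hfun : ((fun row : List (List Char) => row[i]?) ∘ fun r : List (List Char) => r.drop j) =
      fun row : List (List Char) => row[j + i]? := by
    funext r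
    simp [List.getElem?_drop]
  rw [hfun]

theorem pvRend_eq_rendIdx_aux (r : List (List Char)) (T : List (List (List Char))) (j : Nat) :
    pvRend (T.map (fun x => x.drop j)) r = pvRendIdx T r j := by
  induction r generalizing j with
  | nil => rfl
  | cons c r ih =>
    show c ++ List.replicate (pvColw (T.map (fun x => x.drop j)) 0 + 1 - c.length) ' ' ++
        pvRend ((T.map (fun x => x.drop j)).map (fun x => x.drop 1)) r = _
    rw [pvColw_drop T j 0]
    have hmm : (T.map (fun x => x.drop j)).map (fun x => x.drop 1) =
        T.map (fun x => x.drop (j + 1)) := by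
      rw [List.map_map]
      congr 1
      funext x
      simp
    rw [hmm, ih (j + 1)]
    rfl

theorem pvRend_eq_rendIdx (r : List (List Char)) (T : List (List (List Char))) :
    pvRend T r = pvRendIdx T r 0 := by
  have h := pvRend_eq_rendIdx_aux r T 0
  simpa using h

-- ---------- B's loop computes pvRend for every row ----------

theorem pvLoop_base (out : List (List Char)) (T : List (List (List Char)))
    (hlen : out.length = T.length) (hall : ∀ r ∈ T, r = []) :
    (out.zip T).map (fun p => p.1 ++ pvRend T p.2) = out := by
  apply List.ext_getElem
  · simp [hlen]
  · intro i h1 h2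
    have hi : i < T.length := by omega
    have hTi : T[i] = [] := hall _ (List.getElem_mem hi)
    simp [List.getElem_zip, hTi, pvRend]

theorem pvLoop_spec (fuel : Nat) (out : List (List Char)) (T : List (List (List Char)))
    (hfuel : (T.map List.length).sum ≤ fuel) (hlen : out.length = T.length) :
    pvLoop fuel out T = (out.zip T).map (fun p => p.1 ++ pvRend T p.2) := by
  induction fuel generalizing out T with
  | zero =>
    have hall : ∀ r ∈ T, r = [] := by
      intro r hr
      have hsum : r.length ≤ (T.map List.length).sum := List.le_sum_of_mem (List.mem_map_of_mem hr)
      have : r.length = 0 := by omega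
      exact List.eq_nil_of_length_eq_zero this
    rw [pvLoop, pvLoop_base out T hlen hall]
  | succ fuel ih =>
    rw [pvLoop]
    by_cases h : T.any (fun r => !r.isEmpty)
    · rw [if_pos h]
      set w : Nat := ((T.filterMap List.head?).map List.length).foldl max 0 with hwdef
      set out' : List (List Char) := (out.zip T).map (fun p =>
          match p.2 with
          | [] => p.1
          | c :: _ => p.1 ++ c ++ List.replicate (w + 1 - c.length) ' ') with hout'def
      set T' : List (List (List Char)) := T.map (fun r => r.drop 1) with hT'def
      have hne : ∃ r ∈ T, r ≠ [] := by
        rcases List.any_eq_true.mp h with ⟨r, hr, hb⟩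
        exact ⟨r, hr, by simpa using hb⟩
      have hfuel' : (T'.map List.length).sum ≤ fuel := by
        have := pvDropSum_lt T hne
        rw [hT'def]
        omega
      have hlen' : out'.length = T'.length := by
        simp [hout'def, hT'def, hlen]
      rw [ih out' T' hfuel' hlen']
      apply List.ext_getElem
      · simp [hout'def, hT'def, hlen]
      · intro i h1 h2
        have hi : i < T.length := by simp at h2; omega
        have hiout : i < out.length := by omega
        have hizip : i < (out.zip T).length := by simp [hlen]; omega
        simp only [List.getElem_map, List.getElem_zip]
        have hT'i : T'[i]'(by simpa [hT'def] using hi) = (T[i]'hi).drop 1 := by simp [hT'def]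
        have hout'i : out'[i]'(by simp [hout'def, hlen]; omega) =
            (match (T[i]'hi) with
              | [] => out[i]'hiout
              | c :: _ => (out[i]'hiout) ++ c ++ List.replicate (w + 1 - c.length) ' ') := by
          simp [hout'def, List.getElem_zip]
        rw [hT'i, hout'i]
        have hw : w = pvColw T 0 := by
          rw [hwdef]
          unfold pvColw
          have hfun : (List.head? : List (List Char) → Option (List Char)) =
              fun row : List (List Char) => row[0]? := by
            funext r
            simp [List.head?_eq_getElem?]
          rw [hfun]
        cases hTi : (T[i]'hi) with
        | nil => simp [pvRend]
        | cons c r =>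
          show (out[i]'hiout) ++ c ++ List.replicate (w + 1 - c.length) ' ' ++
              pvRend (T.map (fun r => r.drop 1)) r = (out[i]'hiout) ++ pvRend T (c :: r)
          rw [hw]
          show _ = (out[i]'hiout) ++ (c ++ List.replicate (pvColw T 0 + 1 - c.length) ' ' ++
              pvRend (T.map (fun r => r.drop 1)) r)
          simp [List.append_assoc]
    · rw [if_neg h]
      have hall : ∀ r ∈ T, r = [] := by
        intro r hr
        by_contra hne
        exact h (List.any_eq_true.mpr ⟨r, hr, by simpa using hne⟩)
      rw [pvLoop_base out T hlen hall]

-- ---------- A's per-row accumulator = pvRendIdx ----------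

theorem pvRowFold (T : List (List (List Char))) (m : Nat)
    (r : List (List Char)) (s : Nat) (acc0 : List Char)
    (hcell : ∀ k (hk : k < r.length), (r[k]'hk).length ≤ pvColw T (s + k))
    (hm : s + r.length ≤ m) :
    (PySem.List.enumerate r (s : Int)).foldl (fun acc p =>
        acc ++ pvPad p.2 (((List.range m).map (fun j => pvColw T j)).getD p.1.toNat 0) ++ [' '])
      acc0 = acc0 ++ pvRendIdx T r s := by
  induction r generalizing s acc0 with
  | nil => simp [PySem.List.enumerate_nil, pvRendIdx]
  | cons c r ih =>
    rw [PySem.List.enumerate_cons]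
    have hcast : (s : Int) + 1 = ((s + 1 : Nat) : Int) := by push_cast; ring
    simp only [List.foldl_cons, hcast]
    have hs : s < m := by
      have hlc : s + (c :: r).length = s + r.length + 1 := by
        simp only [List.length_cons]; omega
      omega
    have hgetD : ((List.range m).map (fun j => pvColw T j)).getD s 0 = pvColw T s := by
      rw [List.getD_eq_getElem?_getD]
      simp [List.getElem?_range hs]
    have hc : c.length ≤ pvColw T s := by
      have h0 := hcell 0 (by simp)
      simpa using h0
    have hpad : pvPad c (pvColw T s) ++ [' '] =
        c ++ List.replicate (pvColw T s + 1 - c.length) ' ' := by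
      unfold pvPad
      rw [List.append_assoc]
      congr 1
      have h1 : pvColw T s + 1 - c.length = (pvColw T s - c.length) + 1 := by omega
      rw [h1, List.replicate_succ']
    have hcell' : ∀ k (hk : k < r.length), (r[k]'hk).length ≤ pvColw T (s + 1 + k) := by
      intro k hk
      have h2 := hcell (k + 1) (by simpa using Nat.succ_lt_succ hk)
      simp only [List.getElem_cons_succ] at h2
      have harith : s + (k + 1) = s + 1 + k := by omega
      rwa [harith] at h2
    have hm' : (s + 1) + r.length ≤ m := by
      have hlc : s + (c :: r).length = s + r.length + 1 := by
        simp only [List.length_cons]; omega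
      omega
    rw [ih (s + 1) (acc0 ++ pvPad c (((List.range m).map (fun j => pvColw T j)).getD ((s : Int)).toNat 0) ++ [' ']) hcell' hm']
    simp only [Int.toNat_natCast, hgetD, pvRendIdx]
    rw [List.append_cons, List.append_assoc acc0, hpad]
    simp [List.append_assoc]

-- row length bound for A's m
theorem pvRowLen_le_m (T : List (List (List Char))) (row : List (List Char)) (hmem : row ∈ T) :
    row.length ≤ (match T.map List.length with | [] => 0 | h :: t => t.foldl max h) := by
  cases T with
  | nil => simp at hmem
  | cons r0 Ts =>
    show row.length ≤ (Ts.map List.length).foldl max r0.length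
    rcases List.mem_cons.mp hmem with rfl | hT
    · exact (PySem.List.le_foldl_max _ _).1
    · exact (PySem.List.le_foldl_max _ _).2 _ (List.mem_map_of_mem hT)

theorem pvZip_replicate_nil (T : List (List (List Char))) :
    (List.replicate T.length ([] : List Char)).zip T = T.map (fun r => (([] : List Char), r)) := by
  induction T with
  | nil => rfl
  | cons r T ih => simp [List.replicate_succ, ih]

-- the assembled equality over an arbitrary table
theorem pvMain (T : List (List (List Char))) (m : Nat)
    (hm : ∀ row ∈ T, row.length ≤ m) :
    T.map (fun row => String.mk (PySem.Chars.strip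
      ((PySem.List.enumerate row).foldl (fun acc p =>
        acc ++ pvPad p.2 (((List.range m).map (fun j => pvColw T j)).getD p.1.toNat 0) ++ [' ']) []))) =
    (pvLoop (T.map List.length).sum (List.replicate T.length []) T).map
      (fun o => String.mk (PySem.Chars.strip o)) := by
  rw [pvLoop_spec _ _ T le_rfl (by simp), pvZip_replicate_nil, List.map_map, List.map_map]
  apply List.map_congr_left
  intro row hrow
  simp only [Function.comp]
  congr 2
  have hrf := pvRowFold T m row 0 []
      (fun k hk => by simpa using pvColw_ge T row k hrow hk)
      (by simpa using hm row hrow)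
  simp only [Nat.cast_zero] at hrf
  rw [hrf, List.nil_append, List.nil_append, pvRend_eq_rendIdx]

-- ===== VERDICT (by name: the statement is the Claim_ definition above) =====
theorem tabular_format_spec : Claim_equal_tabular_format := by
  intro lines _ _
  unfold Spec_tabular_format
  simp only [tabular_format, tabular_format_alt]
  simp only [PySem.List.foldl_append_singleton_eq_map, List.nil_append]
  rw [pvColLen_eq]
  rw [pvMain (lines.map fun line => PySem.Chars.split₀ line.toList) _
      (fun row hrow => pvRowLen_le_m _ row hrow)]
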